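-- pv_equiv track=rewrite | github.com/tnndbtc/agent | novel_agent/modules/outliner.py | _parse_scenes
-- ===== SOURCE A (Python) =====
-- from typing import Dict, Any, Optional, List
--
-- def _parse_scenes(response_text: str) -> List[Dict[str, str]]:
--     """Parse scene breakdown response."""
--     scenes = []
--     current_scene = {}
--     current_field = None
--
--     lines = response_text.split('\n')
--     for line in lines:
--         line = line.strip()
--
--         if line.startswith('SCENE '):
--             if current_scene:
--                 scenes.append(current_scene)
--             number = line.replace('SCENE', '').strip()
--             current_scene = {'number': number}
--             current_field = 'number'
--         elif line.startswith('Setting:'):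
--             current_scene['setting'] = line.replace('Setting:', '').strip()
--             current_field = 'setting'
--         elif line.startswith('Characters:'):
--             current_scene['characters'] = line.replace('Characters:', '').strip()
--             current_field = 'characters'
--         elif line.startswith('Action:'):
--             current_scene['action'] = line.replace('Action:', '').strip()
--             current_field = 'action'
--         elif line.startswith('Purpose:'):
--             current_scene['purpose'] = line.replace('Purpose:', '').strip()
--             current_field = 'purpose'
--         elif line.startswith('Tone:'):
--             current_scene['tone'] = line.replace('Tone:', '').strip()
--             current_field = 'tone'
--         elif current_field and line and not line.startswith(('---', 'SCENE', 'Setting:', 'Characters:', 'Action:', 'Purpose:', 'Tone:')):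
--             if current_field in current_scene:
--                 current_scene[current_field] += ' ' + line
--
--     if current_scene:
--         scenes.append(current_scene)
--
--     return scenes
-- ===== SOURCE B (Python) =====
-- # Two-pass re-implementation: first cut the stripped lines into scene blocks,
-- # then parse each block independently with a prefix table.
--
-- _FIELDS = [('setting', 'Setting:'), ('characters', 'Characters:'),
--            ('action', 'Action:'), ('purpose', 'Purpose:'), ('tone', 'Tone:')]
-- _STOP = ('---', 'SCENE', 'Setting:', 'Characters:', 'Action:', 'Purpose:', 'Tone:')
--
--
-- def _parse_block(block):
--     d = {}
--     field = None
--     for line in block: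
--         if line.startswith('SCENE '):
--             d['number'] = line.replace('SCENE', '').strip()
--             field = 'number'
--             continue
--         for key, prefix in _FIELDS:
--             if line.startswith(prefix):
--                 d[key] = line.replace(prefix, '').strip()
--                 field = key
--                 break
--         else:
--             if field is not None and line and not line.startswith(_STOP) and field in d:
--                 d[field] += ' ' + line
--     return d
--
--
-- def _parse_scenes(response_text):
--     blocks = []
--     cur = []
--     for raw in response_text.split('\n'):
--         line = raw.strip()
--         if line.startswith('SCENE '):
--             blocks.append(cur)
--             cur = [line]
--         else:
--             cur.append(line)
--     blocks.append(cur)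
--
--     scenes = []
--     for block in blocks:
--         d = _parse_block(block)
--         if d:
--             scenes.append(d)
--     return scenes
-- ===== Notes on version B (the rewrite author's own statement) =====
-- stated objective: alternative
-- what changed: Replaces A's single stateful loop over all lines by a two-pass decomposition: a first pass cuts the stripped lines into scene blocks at scene-header lines, a second pass parses each block independently via a (key, prefix) table with a for/break/else scan, appending only non-empty block dicts.
import Mathlib
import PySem

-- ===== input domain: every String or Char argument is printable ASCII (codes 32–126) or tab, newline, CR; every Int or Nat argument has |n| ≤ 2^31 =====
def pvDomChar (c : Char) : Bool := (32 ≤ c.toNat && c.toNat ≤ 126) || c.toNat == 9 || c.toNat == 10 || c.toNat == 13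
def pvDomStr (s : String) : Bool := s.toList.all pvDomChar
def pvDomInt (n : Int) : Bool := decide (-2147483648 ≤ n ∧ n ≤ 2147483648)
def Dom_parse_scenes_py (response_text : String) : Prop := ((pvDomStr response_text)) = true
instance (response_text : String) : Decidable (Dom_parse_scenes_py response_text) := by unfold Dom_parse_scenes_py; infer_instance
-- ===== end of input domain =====

-- B replaces A's single stateful line loop by a two-pass decomposition (cut into scene
-- blocks, then parse each block with a prefix table); objective: alternative, not faster.

-- ===== PORT A =====
-- A's loop body (the if/elif chain over one raw line, state = (scenes, current_scene, current_field))
def pvStepA (st : List (List (String × String)) × PySem.Dict String String × Option String)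
    (raw : String) : List (List (String × String)) × PySem.Dict String String × Option String :=
  let line := PySem.Str.strip raw
  let scenes := st.1
  let cur := st.2.1
  let f := st.2.2
  if PySem.Str.startswith line "SCENE " then
    let scenes := if cur.items = [] then scenes else scenes ++ [cur.items]
    let number := PySem.Str.strip (PySem.Str.replace line "SCENE" "")
    (scenes, (PySem.Dict.empty).insert "number" number, some "number")
  else if PySem.Str.startswith line "Setting:" then
    (scenes, cur.insert "setting" (PySem.Str.strip (PySem.Str.replace line "Setting:" "")), some "setting")
  else if PySem.Str.startswith line "Characters:" then
    (scenes, cur.insert "characters" (PySem.Str.strip (PySem.Str.replace line "Characters:" "")), some "characters")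
  else if PySem.Str.startswith line "Action:" then
    (scenes, cur.insert "action" (PySem.Str.strip (PySem.Str.replace line "Action:" "")), some "action")
  else if PySem.Str.startswith line "Purpose:" then
    (scenes, cur.insert "purpose" (PySem.Str.strip (PySem.Str.replace line "Purpose:" "")), some "purpose")
  else if PySem.Str.startswith line "Tone:" then
    (scenes, cur.insert "tone" (PySem.Str.strip (PySem.Str.replace line "Tone:" "")), some "tone")
  else
    match f with
    | some k =>
      if (line != "")
          && !(PySem.Str.startswith line "---" || PySem.Str.startswith line "SCENE"
              || PySem.Str.startswith line "Setting:" || PySem.Str.startswith line "Characters:"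
              || PySem.Str.startswith line "Action:" || PySem.Str.startswith line "Purpose:"
              || PySem.Str.startswith line "Tone:") then
        if (cur.get? k).isSome then
          (scenes, cur.insert k (cur.getD k "" ++ " " ++ line), some k)
        else (scenes, cur, some k)
      else (scenes, cur, some k)
    | none => (scenes, cur, none)

def parse_scenes_py (response_text : String) : List (List (String × String)) :=
  let lines := (PySem.Str.split? response_text "\n").getD []  -- sep "\n" ≠ "", never none
  let st := lines.foldl pvStepA ([], PySem.Dict.empty, none)
  if st.2.1.items = [] then st.1 else st.1 ++ [st.2.1.items]

-- ===== PORT B =====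
def pvFields : List (String × String) :=
  [("setting", "Setting:"), ("characters", "Characters:"),
   ("action", "Action:"), ("purpose", "Purpose:"), ("tone", "Tone:")]

def pvStop (line : String) : Bool :=
  PySem.Str.startswith line "---" || PySem.Str.startswith line "SCENE"
    || PySem.Str.startswith line "Setting:" || PySem.Str.startswith line "Characters:"
    || PySem.Str.startswith line "Action:" || PySem.Str.startswith line "Purpose:"
    || PySem.Str.startswith line "Tone:"

-- one stripped line of a block (for/break/else over the prefix table)
def pvBStep (st : PySem.Dict String String × Option String) (line : String) :
    PySem.Dict String String × Option String :=
  if PySem.Str.startswith line "SCENE " then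
    (st.1.insert "number" (PySem.Str.strip (PySem.Str.replace line "SCENE" "")), some "number")
  else
    match pvFields.find? (fun kp => PySem.Str.startswith line kp.2) with
    | some (k, p) => (st.1.insert k (PySem.Str.strip (PySem.Str.replace line p "")), some k)
    | none =>
      match st.2 with
      | some k =>
        if (line != "") && !pvStop line && (st.1.get? k).isSome then
          (st.1.insert k (st.1.getD k "" ++ " " ++ line), some k)
        else st
      | none => st

def pvParseBlock (block : List String) : PySem.Dict String String :=
  (block.foldl pvBStep (PySem.Dict.empty, none)).1

-- first pass: cut stripped lines into blocks (state = (finished blocks, current block))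
def pvBlockStep (st : List (List String) × List String) (raw : String) :
    List (List String) × List String :=
  let line := PySem.Str.strip raw
  if PySem.Str.startswith line "SCENE " then (st.1 ++ [st.2], [line])
  else (st.1, st.2 ++ [line])

def parse_scenes_py_alt (response_text : String) : List (List (String × String)) :=
  let lines := (PySem.Str.split? response_text "\n").getD []  -- sep "\n" ≠ "", never none
  let st := lines.foldl pvBlockStep ([], [])
  let blocks := st.1 ++ [st.2]
  blocks.foldl (fun scenes block =>
    let d := pvParseBlock block
    if d.items = [] then scenes else scenes ++ [d.items]) []

-- ===== PRECONDITION & SPEC =====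
def Spec_parse_scenes_py (response_text : String) (out : List (List (String × String))) : Prop := out = parse_scenes_py_alt response_text
instance (response_text : String) (out : List (List (String × String))) : Decidable (Spec_parse_scenes_py response_text out) := by unfold Spec_parse_scenes_py; infer_instance

-- ===== CLAIM (what is proved, stated in full; the proofs are below) =====
def Claim_equal_parse_scenes_py : Prop := ∀ (response_text : String), Dom_parse_scenes_py response_text → Spec_parse_scenes_py response_text (parse_scenes_py response_text)

-- ===== LEMMAS AND PROOFS =====

-- common recursive reading of both programs: process the remaining raw lines from a
-- partial-block state (d, f)
def pvR : List String → PySem.Dict String String → Option String → List (List (String × String))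
  | [], d, _ => if d.items = [] then [] else [d.items]
  | raw :: ls, d, f =>
    let s := PySem.Str.strip raw
    if PySem.Str.startswith s "SCENE " then
      (if d.items = [] then [] else [d.items])
        ++ pvR ls (pvBStep (PySem.Dict.empty, none) s).1 (pvBStep (PySem.Dict.empty, none) s).2
    else pvR ls (pvBStep (d, f) s).1 (pvBStep (d, f) s).2

set_option maxHeartbeats 1000000 in
lemma pvStepA_eq (scenes : List (List (String × String))) (d : PySem.Dict String String)
    (f : Option String) (raw : String) :
    pvStepA (scenes, d, f) raw =
      (if PySem.Str.startswith (PySem.Str.strip raw) "SCENE "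
        then ((if d.items = [] then scenes else scenes ++ [d.items]),
              pvBStep (PySem.Dict.empty, none) (PySem.Str.strip raw))
        else (scenes, pvBStep (d, f) (PySem.Str.strip raw))) := by
  unfold pvStepA pvBStep pvFields pvStop
  generalize PySem.Str.strip raw = s
  by_cases h1 : PySem.Str.startswith s "SCENE " <;>
    by_cases h2 : PySem.Str.startswith s "Setting:" <;>
    by_cases h3 : PySem.Str.startswith s "Characters:" <;>
    by_cases h4 : PySem.Str.startswith s "Action:" <;>
    by_cases h5 : PySem.Str.startswith s "Purpose:" <;>
    by_cases h6 : PySem.Str.startswith s "Tone:" <;>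
    cases f <;>
    simp only [h1, h2, h3, h4, h5, h6, List.find?, if_true, if_false, Bool.false_eq_true] <;>
    split_ifs <;> simp_all

lemma pvL1 (ls : List String) : ∀ (scenes : List (List (String × String)))
    (d : PySem.Dict String String) (f : Option String),
    (let st := ls.foldl pvStepA (scenes, d, f);
     if st.2.1.items = [] then st.1 else st.1 ++ [st.2.1.items]) = scenes ++ pvR ls d f := by
  induction ls with
  | nil =>
    intro scenes d f
    by_cases hd : d.items = [] <;> simp [pvR, hd]
  | cons raw ls ih =>
    intro scenes d f
    simp only [List.foldl_cons, pvStepA_eq]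
    by_cases h : PySem.Str.startswith (PySem.Str.strip raw) "SCENE "
    · simp only [h, if_true]
      rw [← Prod.mk.eta (p := pvBStep (PySem.Dict.empty, none) (PySem.Str.strip raw))]
      rw [ih]
      simp only [pvR, h, if_true]
      by_cases hd : d.items = [] <;> simp [hd]
    · simp only [h, if_false, Bool.false_eq_true]
      rw [← Prod.mk.eta (p := pvBStep (d, f) (PySem.Str.strip raw))]
      rw [ih]
      conv_rhs => rw [pvR]
      rw [if_neg h]

lemma pvBlockAcc (ls : List String) : ∀ (done : List (List String)) (cur : List String),
    ls.foldl pvBlockStep (done, cur)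
      = (done ++ (ls.foldl pvBlockStep ([], cur)).1, (ls.foldl pvBlockStep ([], cur)).2) := by
  induction ls with
  | nil => intro done cur; simp
  | cons raw ls ih =>
    intro done cur
    simp only [List.foldl_cons, pvBlockStep, List.nil_append]
    by_cases h : PySem.Str.startswith (PySem.Str.strip raw) "SCENE "
    · simp only [h, if_true]
      rw [ih (done ++ [cur]) [PySem.Str.strip raw], ih [cur] [PySem.Str.strip raw]]
      simp
    · simp only [h, if_false, Bool.false_eq_true]
      rw [ih done (cur ++ [PySem.Str.strip raw])]

def pvKeep (b : List String) : Bool := (pvParseBlock b).items != []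

lemma pvL2 (ls : List String) : ∀ (cur : List String),
    (let st := ls.foldl pvBlockStep ([], cur);
     ((st.1 ++ [st.2]).filter pvKeep).map (fun b => (pvParseBlock b).items))
    = pvR ls (pvParseBlock cur) ((cur.foldl pvBStep (PySem.Dict.empty, none)).2) := by
  induction ls with
  | nil =>
    intro cur
    simp only [List.foldl_nil, List.nil_append, List.filter_cons, List.filter_nil, pvKeep, pvR]
    by_cases hd : (pvParseBlock cur).items = []
    · simp [hd]
    · simp [hd]
  | cons raw ls ih =>
    intro cur
    simp only [List.foldl_cons, pvBlockStep, List.nil_append]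
    by_cases h : PySem.Str.startswith (PySem.Str.strip raw) "SCENE "
    · simp only [h, if_true]
      rw [pvBlockAcc ls [cur] [PySem.Str.strip raw]]
      have hsplit : ([cur] ++ (ls.foldl pvBlockStep ([], [PySem.Str.strip raw])).1)
            ++ [(ls.foldl pvBlockStep ([], [PySem.Str.strip raw])).2]
          = [cur] ++ ((ls.foldl pvBlockStep ([], [PySem.Str.strip raw])).1
            ++ [(ls.foldl pvBlockStep ([], [PySem.Str.strip raw])).2]) := by simp
      rw [hsplit, List.filter_append, List.map_append]
      rw [ih [PySem.Str.strip raw]]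
      conv_rhs => rw [pvR]
      rw [if_pos h]
      have hone : pvParseBlock [PySem.Str.strip raw]
          = (pvBStep (PySem.Dict.empty, none) (PySem.Str.strip raw)).1 := by
        simp only [pvParseBlock, List.foldl_cons, List.foldl_nil]
      have hone2 : (List.foldl pvBStep (PySem.Dict.empty, none) [PySem.Str.strip raw]).2
          = (pvBStep (PySem.Dict.empty, none) (PySem.Str.strip raw)).2 := by
        simp only [List.foldl_cons, List.foldl_nil]
      rw [hone, hone2]
      simp only [List.filter_cons, List.filter_nil]
      by_cases hd : (pvParseBlock cur).items = [] <;> simp [pvKeep, hd]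
    · simp only [h, if_false, Bool.false_eq_true]
      rw [ih (cur ++ [PySem.Str.strip raw])]
      conv_rhs => rw [pvR]
      rw [if_neg h]
      have hstep : pvParseBlock (cur ++ [PySem.Str.strip raw])
          = (pvBStep (List.foldl pvBStep (PySem.Dict.empty, none) cur) (PySem.Str.strip raw)).1 := by
        simp only [pvParseBlock, List.foldl_append, List.foldl_cons, List.foldl_nil]
      have hstep2 : (List.foldl pvBStep (PySem.Dict.empty, none) (cur ++ [PySem.Str.strip raw])).2
          = (pvBStep (List.foldl pvBStep (PySem.Dict.empty, none) cur) (PySem.Str.strip raw)).2 := by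
        simp only [List.foldl_append, List.foldl_cons, List.foldl_nil]
      rw [hstep, hstep2]
      rfl

-- ===== VERDICT (by name: the statement is the Claim_ definition above) =====
theorem parse_scenes_py_spec : Claim_equal_parse_scenes_py := by
  intro s _
  unfold Spec_parse_scenes_py parse_scenes_py parse_scenes_py_alt
  have hfun : (fun (scenes : List (List (String × String))) (block : List String) =>
      let d := pvParseBlock block
      if d.items = [] then scenes else scenes ++ [d.items])
      = (fun scenes block => if pvKeep block = true
          then scenes ++ [(pvParseBlock block).items] else scenes) := by
    funext scenes block
    by_cases hd : (pvParseBlock block).items = [] <;> simp [pvKeep, hd]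
  rw [pvL1]
  rw [hfun, PySem.List.foldl_append_if]
  rw [pvL2]
  simp [pvParseBlock]
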